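-- pv_equiv track=rewrite | github.com/tyler-renkema/noc-diagkit | multicheck.py | parse_next_hop
-- ===== SOURCE A (Python) =====
-- def parse_next_hop(output):
--     # Basic parse: look for known format lines
--     for line in output.splitlines():
--         if "via" in line:
--             parts = line.strip().split()
--             for i, word in enumerate(parts):
--                 if word == "via" and i + 1 < len(parts):
--                     return parts[i + 1]
--     return "No next-hop found"
-- ===== SOURCE B (Python) =====
-- def parse_next_hop(output):
--     # One char-level pass per line (two-pointer scan): no strip(), no split(),
--     # no token list -- find a whitespace-delimited "via" and capture the
--     # following whitespace-delimited token in place.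
--     for line in output.splitlines():
--         n = len(line)
--         i = 0
--         while i < n:
--             c = line[i]
--             if c == ' ' or c == '\t':
--                 i += 1
--                 continue
--             j = i
--             while j < n and line[j] != ' ' and line[j] != '\t':
--                 j += 1
--             if line[i:j] == "via":
--                 k = j
--                 while k < n and (line[k] == ' ' or line[k] == '\t'):
--                     k += 1
--                 if k < n:
--                     m = k
--                     while m < n and line[m] != ' ' and line[m] != '\t':
--                         m += 1
--                     return line[k:m]
--             i = j
--     return "No next-hop found"
-- ===== Notes on version B (the rewrite author's own statement) =====
-- stated objective: alternative
-- what changed: B replaces A's strip/split/enumerate token-list pipeline with a single in-place char-level two-pointer scan per line that never materialises a token list: it skips whitespace, checks whether the run starting at the cursor is exactly 'via', and if so captures the following whitespace-delimited run directly by index slicing.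
import Mathlib
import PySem

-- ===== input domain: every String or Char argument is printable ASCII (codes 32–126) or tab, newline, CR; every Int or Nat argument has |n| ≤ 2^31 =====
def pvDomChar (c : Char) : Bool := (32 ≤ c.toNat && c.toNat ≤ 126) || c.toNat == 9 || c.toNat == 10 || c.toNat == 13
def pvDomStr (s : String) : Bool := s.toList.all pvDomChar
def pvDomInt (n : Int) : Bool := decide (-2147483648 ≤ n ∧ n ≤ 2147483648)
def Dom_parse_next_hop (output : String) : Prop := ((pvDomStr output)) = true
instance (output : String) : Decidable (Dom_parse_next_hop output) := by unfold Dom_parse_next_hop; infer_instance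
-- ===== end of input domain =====

-- B replaces A's strip/split/enumerate token-list pipeline with a single in-place
-- char-level two-pointer scan per line (objective: alternative; same cost).

-- ===== PORT A =====
-- inner loop: 'for i, word in enumerate(parts): if word == "via" and i + 1 < len(parts): return parts[i + 1]'
def parseNextHopInnerA (parts : List (List Char)) : List (Int × List Char) → Option (List Char)
  | [] => none
  | (i, word) :: rest =>
      if word = "via".toList ∧ i + 1 < (parts.length : Int) then
        some (PySem.List.pyGetD parts (i + 1) [])   -- parts[i+1]; the guard keeps the index in range
      else parseNextHopInnerA parts rest

-- outer loop: 'for line in output.splitlines(): if "via" in line: parts = line.strip().split(); … (inner) …'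
def parseNextHopLinesA : List (List Char) → String
  | [] => "No next-hop found"
  | line :: rest =>
      if PySem.Chars.isIn "via".toList line then
        match parseNextHopInnerA (PySem.Chars.split₀ (PySem.Chars.strip line))
              (PySem.List.enumerate (PySem.Chars.split₀ (PySem.Chars.strip line))) with
        | some w => String.ofList w
        | none => parseNextHopLinesA rest
      else parseNextHopLinesA rest

def parse_next_hop (output : String) : String :=
  parseNextHopLinesA (PySem.Chars.splitlines output.toList)

-- ===== PORT B =====
-- "c == ' ' or c == '\t'" (char equality is code-point equality)
def pvIsWS (c : Char) : Bool := decide (c.toNat = 32) || decide (c.toNat = 9)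

-- the j-loop 'while j < n and line[j] != " " and line[j] != "\t": j += 1' together with
-- the slice line[i:j]: consume the maximal non-whitespace run, return (run, rest)
def pvRun : List Char → List Char × List Char
  | [] => ([], [])
  | c :: rest =>
      if pvIsWS c then ([], c :: rest)
      else
        let p := pvRun rest
        (c :: p.1, p.2)

lemma pvRun_snd_length (s : List Char) : (pvRun s).2.length ≤ s.length := by
  induction s with
  | nil => simp [pvRun]
  | cons c rest ih =>
    simp only [pvRun]
    split
    · simp
    · simpa using Nat.le_succ_of_le ih

-- the k-loop 'while k < n and (line[k] == " " or line[k] == "\t"): k += 1': skip whitespace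
def pvSkipWS : List Char → List Char
  | [] => []
  | c :: rest => if pvIsWS c then pvSkipWS rest else c :: rest

-- the outer while-loop over i: at each step, skip one whitespace char, or consume a token;
-- if the token is "via", skip whitespace and capture the next run (the m-loop + line[k:m])
def pvScanLine : List Char → Option (List Char)
  | [] => none
  | c :: rest =>
      if pvIsWS c then pvScanLine rest
      else
        let p := pvRun rest
        if c :: p.1 = "via".toList then
          match pvSkipWS p.2 with
          | d :: ds => some (d :: (pvRun ds).1)
          | [] => pvScanLine p.2          -- i = j: only whitespace can remain
        else pvScanLine p.2               -- i = j
termination_by s => s.length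
decreasing_by
  · simp
  · exact Nat.lt_succ_of_le (pvRun_snd_length rest)
  · exact Nat.lt_succ_of_le (pvRun_snd_length rest)

-- 'for line in output.splitlines(): … return …' / final 'return "No next-hop found"'
def pvScanLines : List (List Char) → String
  | [] => "No next-hop found"
  | line :: rest =>
      match pvScanLine line with
      | some w => String.ofList w
      | none => pvScanLines rest

def parse_next_hop_alt (output : String) : String :=
  pvScanLines (PySem.Chars.splitlines output.toList)

-- ===== PRECONDITION & SPEC =====
def Spec_parse_next_hop (output : String) (out : String) : Prop := out = parse_next_hop_alt output
instance (output : String) (out : String) : Decidable (Spec_parse_next_hop output out) := by unfold Spec_parse_next_hop; infer_instance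

-- ===== CLAIM (what is proved, stated in full; the proofs are below) =====
def Claim_equal_parse_next_hop : Prop := ∀ (output : String), Dom_parse_next_hop output → Spec_parse_next_hop output (parse_next_hop output)

-- ===== LEMMAS AND PROOFS =====

-- per-line candidate list: successors of "via" tokens (proof-side abstraction of both programs)
def viaPairs (parts : List (List Char)) : List (List Char) :=
  (parts.zip parts.tail).filterMap
    (fun p => if p.1 = "via".toList then some p.2 else none)

-- ---- A-side: A's inner enumerate scan returns the head of the candidate list ----
lemma innerA_eq_head (full : List (List Char)) :
    ∀ (suf : List (List Char)) (k : Nat), full.drop k = suf →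
      parseNextHopInnerA full (PySem.List.enumerate suf (k : Int)) =
      (viaPairs suf).head? := by
  intro suf
  induction suf with
  | nil => intro k _; simp [PySem.List.enumerate, parseNextHopInnerA, viaPairs]
  | cons w xs ih =>
    intro k hk
    have hk1 : full.drop (k+1) = xs := by
      have := congrArg List.tail hk
      simpa [← List.tail_drop] using this
    rw [PySem.List.enumerate_cons]
    simp only [parseNextHopInnerA]
    by_cases hw : w = "via".toList
    · cases xs with
      | nil =>
        have hlen : full.length ≤ k + 1 := by
          have := List.drop_eq_nil_iff.mp hk1; omega
        rw [if_neg (by intro h; exact absurd h.2 (by push Not; exact_mod_cast Nat.cast_le.mpr hlen))]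
        simp [PySem.List.enumerate, parseNextHopInnerA, viaPairs]
      | cons y ys =>
        have hlen : k + 1 < full.length := by
          have := congrArg List.length hk1; simp at this; omega
        rw [if_pos ⟨hw, by exact_mod_cast hlen⟩]
        have hy : PySem.List.pyGetD full ((k : Int) + 1) [] = y := by
          have h1 : ((k : Int) + 1) = ((k + 1 : Nat) : Int) := by push_cast; ring
          rw [h1, PySem.List.pyGetD_natCast]
          have h0 := (List.getElem?_drop (i := k+1) (j := 0) (xs := full))
          rw [hk1] at h0
          have : full[k+1]? = some y := by simpa using h0.symm
          simp [List.getD_eq_getElem?_getD, this]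
        rw [hy]
        have hw2 : w = ['v','i','a'] := by simpa using hw
        simp [viaPairs, hw2]
    · have hw2 : w ≠ ['v','i','a'] := by simpa using hw
      rw [if_neg (by intro h; exact hw h.1)]
      rw [show ((k:Int)+1) = ((k+1:Nat):Int) by push_cast; ring, ih (k+1) hk1]
      cases xs <;> simp [viaPairs, hw2]

lemma split₀_go_ws_tail (t : List Char) (ht : ∀ c ∈ t, PySem.Chars.isspace c = true) :
    ∀ (cur : List Char) (acc : List (List Char)),
      PySem.Chars.split₀.go t cur acc = PySem.Chars.split₀.go [] cur acc := by
  induction t with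
  | nil => intro cur acc; rfl
  | cons c t' ih =>
    intro cur acc
    have hc : PySem.Chars.isspace c = true := ht c (List.mem_cons_self ..)
    have ht' : ∀ c ∈ t', PySem.Chars.isspace c = true := fun x hx => ht x (List.mem_cons_of_mem _ hx)
    conv_lhs => rw [PySem.Chars.split₀.go]
    rw [if_pos hc]
    cases cur with
    | nil => rw [ih ht' [] acc]; simp
    | cons x xs =>
      simp only [List.isEmpty_cons, Bool.false_eq_true, if_false]
      rw [ih ht' [] _]
      conv_rhs => rw [PySem.Chars.split₀.go]
      conv_lhs => rw [PySem.Chars.split₀.go]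
      simp

lemma split₀_go_append_ws (t : List Char) (ht : ∀ c ∈ t, PySem.Chars.isspace c = true) :
    ∀ (s cur : List Char) (acc : List (List Char)),
      PySem.Chars.split₀.go (s ++ t) cur acc = PySem.Chars.split₀.go s cur acc := by
  intro s
  induction s with
  | nil => intro cur acc; simpa using split₀_go_ws_tail t ht cur acc
  | cons c s' ih =>
    intro cur acc
    conv_lhs => rw [List.cons_append, PySem.Chars.split₀.go]
    conv_rhs => rw [PySem.Chars.split₀.go]
    by_cases hc : PySem.Chars.isspace c = true
    · rw [if_pos hc, if_pos hc]
      cases cur with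
      | nil => simp only [List.isEmpty_nil]; exact ih _ _
      | cons x xs =>
        simp only [List.isEmpty_cons, Bool.false_eq_true, if_false]
        exact ih _ _
    · rw [if_neg hc, if_neg hc]; exact ih _ _

lemma split₀_lstrip (s : List Char) :
    PySem.Chars.split₀ (PySem.Chars.lstrip s) = PySem.Chars.split₀ s := by
  unfold PySem.Chars.split₀ PySem.Chars.lstrip
  induction s with
  | nil => rfl
  | cons c s' ih =>
    by_cases hc : PySem.Chars.isspace c = true
    · rw [List.dropWhile_cons_of_pos hc]
      rw [ih]
      conv_rhs => rw [PySem.Chars.split₀.go]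
      rw [if_pos hc]
      simp
    · rw [List.dropWhile_cons_of_neg hc]

lemma split₀_strip (s : List Char) :
    PySem.Chars.split₀ (PySem.Chars.strip s) = PySem.Chars.split₀ s := by
  rw [show PySem.Chars.strip s = PySem.Chars.rstrip (PySem.Chars.lstrip s) from rfl]
  rw [← split₀_lstrip s]
  generalize PySem.Chars.lstrip s = u
  unfold PySem.Chars.rstrip
  have hsplit : u = (List.dropWhile PySem.Chars.isspace u.reverse).reverse
      ++ (List.takeWhile PySem.Chars.isspace u.reverse).reverse := by
    have := List.takeWhile_append_dropWhile (p := PySem.Chars.isspace) (l := u.reverse)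
    calc u = u.reverse.reverse := by simp
    _ = (List.takeWhile PySem.Chars.isspace u.reverse ++ List.dropWhile PySem.Chars.isspace u.reverse).reverse := by rw [this]
    _ = _ := by rw [List.reverse_append]
  conv_rhs => rw [hsplit]
  unfold PySem.Chars.split₀
  rw [split₀_go_append_ws]
  intro c hc
  have : c ∈ List.takeWhile PySem.Chars.isspace u.reverse := by
    simpa using hc
  exact List.mem_takeWhile_imp this

lemma split₀_go_mem_infix (t : List Char) :
    ∀ (s cur : List Char) (acc : List (List Char)),
      t ∈ PySem.Chars.split₀.go s cur acc → t ∈ acc ∨ t <:+: (cur.reverse ++ s) := by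
  intro s
  induction s with
  | nil =>
    intro cur acc h
    rw [PySem.Chars.split₀.go] at h
    by_cases hcur : cur.isEmpty = true
    · rw [if_pos hcur] at h; left; simpa using h
    · rw [if_neg hcur] at h
      simp only [List.mem_reverse, List.mem_cons] at h
      rcases h with h | h
      · right; rw [h]; simp
      · left; exact h
  | cons c s' ih =>
    intro cur acc h
    rw [PySem.Chars.split₀.go] at h
    by_cases hc : PySem.Chars.isspace c = true
    · rw [if_pos hc] at h
      by_cases hcur : cur.isEmpty = true
      · rw [if_pos hcur] at h
        rcases ih [] acc h with h' | h'
        · left; exact h'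
        · right; simp only [List.reverse_nil, List.nil_append] at h'
          exact h'.trans ⟨cur.reverse ++ [c], [], by simp⟩
      · rw [if_neg hcur] at h
        rcases ih [] _ h with h' | h'
        · rcases List.mem_cons.mp h' with h'' | h''
          · right; rw [h'']; exact ⟨[], c :: s', by simp⟩
          · left; exact h''
        · right; simp only [List.reverse_nil, List.nil_append] at h'
          refine h'.trans ⟨cur.reverse ++ [c], [], by simp⟩
    · rw [if_neg hc] at h
      rcases ih (c :: cur) acc h with h' | h'
      · left; exact h'
      · right; simpa using h'

lemma mem_split₀_infix {t s : List Char} (h : t ∈ PySem.Chars.split₀ s) : t <:+: s := by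
  rcases split₀_go_mem_infix t s [] [] h with h' | h'
  · simp at h'
  · simpa using h'

lemma isIn_of_viaPairs_ne_nil {line : List Char}
    (h : viaPairs (PySem.Chars.split₀ line) ≠ []) :
    PySem.Chars.isIn "via".toList line = true := by
  unfold viaPairs at h
  rw [PySem.Chars.isIn_iff_infix]
  rw [Ne, List.filterMap_eq_nil_iff] at h
  push Not at h
  rcases h with ⟨p, hp, hne⟩
  have hfst : p.1 = "via".toList := by
    by_contra hf
    exact hne (if_neg hf)
  have hmem : p.1 ∈ PySem.Chars.split₀ line :=
    (List.of_mem_zip hp).1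
  rw [hfst] at hmem
  exact mem_split₀_infix hmem

lemma linesA_eq (lines : List (List Char)) :
    parseNextHopLinesA lines =
      match lines.flatMap (fun line => viaPairs (PySem.Chars.split₀ line)) with
      | h :: _ => String.ofList h
      | [] => "No next-hop found" := by
  induction lines with
  | nil => rfl
  | cons line rest ih =>
    have hinner : parseNextHopInnerA (PySem.Chars.split₀ (PySem.Chars.strip line))
        (PySem.List.enumerate (PySem.Chars.split₀ (PySem.Chars.strip line))) =
        (viaPairs (PySem.Chars.split₀ line)).head? := by
      rw [split₀_strip]
      have := innerA_eq_head (PySem.Chars.split₀ line) (PySem.Chars.split₀ line) 0 (by simp)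
      simpa using this
    rw [List.flatMap_cons]
    cases hvp : viaPairs (PySem.Chars.split₀ line) with
    | nil =>
      simp only [parseNextHopLinesA, hinner, hvp, List.nil_append]
      split_ifs <;> simp [ih]
    | cons hfst htl =>
      have hin : PySem.Chars.isIn "via".toList line = true :=
        isIn_of_viaPairs_ne_nil (by rw [hvp]; simp)
      simp only [parseNextHopLinesA, hin, if_true, hinner, hvp]
      simp

-- ---- split₀ recursion equations ----
-- proof-side token run using Python's full isspace
def tokRun : List Char → List Char × List Char
  | [] => ([], [])
  | c :: rest =>
      if PySem.Chars.isspace c then ([], c :: rest)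
      else
        let p := tokRun rest
        (c :: p.1, p.2)

lemma split₀_ws_cons {c : Char} (hc : PySem.Chars.isspace c = true) (rest : List Char) :
    PySem.Chars.split₀ (c :: rest) = PySem.Chars.split₀ rest := by
  unfold PySem.Chars.split₀
  conv_lhs => rw [PySem.Chars.split₀.go]
  simp [hc]

lemma split₀_go_acc (s : List Char) :
    ∀ (cur : List Char) (acc : List (List Char)),
      PySem.Chars.split₀.go s cur acc = acc.reverse ++ PySem.Chars.split₀.go s cur [] := by
  induction s with
  | nil =>
    intro cur acc
    rw [PySem.Chars.split₀.go, PySem.Chars.split₀.go]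
    by_cases hcur : cur.isEmpty = true <;> simp [hcur]
  | cons c rest ih =>
    intro cur acc
    rw [PySem.Chars.split₀.go]
    conv_rhs => rw [PySem.Chars.split₀.go]
    by_cases hc : PySem.Chars.isspace c = true
    · rw [if_pos hc, if_pos hc]
      by_cases hcur : cur.isEmpty = true
      · simp only [hcur, if_true]; exact ih [] acc
      · simp only [hcur]
        rw [ih [] (cur.reverse :: acc), ih [] [cur.reverse]]
        simp
    · rw [if_neg hc, if_neg hc]; exact ih (c :: cur) acc

lemma split₀_go_mid (s : List Char) :
    ∀ (cur : List Char), cur ≠ [] →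
      PySem.Chars.split₀.go s cur [] =
        (cur.reverse ++ (tokRun s).1) :: PySem.Chars.split₀ (tokRun s).2 := by
  induction s with
  | nil =>
    intro cur hcur
    rw [PySem.Chars.split₀.go]
    simp [List.isEmpty_iff, hcur, tokRun, PySem.Chars.split₀, PySem.Chars.split₀.go]
  | cons c rest ih =>
    intro cur hcur
    rw [PySem.Chars.split₀.go]
    by_cases hc : PySem.Chars.isspace c = true
    · rw [if_pos hc]
      simp only [List.isEmpty_iff, hcur, if_false]
      rw [split₀_go_acc, tokRun, if_pos hc]
      have h2 := split₀_ws_cons hc rest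
      unfold PySem.Chars.split₀ at h2 ⊢
      rw [h2]
      simp
    · rw [if_neg hc, ih (c :: cur) (by simp), tokRun, if_neg hc]
      simp

lemma split₀_cons_nonws {c : Char} (hc : ¬ PySem.Chars.isspace c = true) (rest : List Char) :
    PySem.Chars.split₀ (c :: rest) =
      (c :: (tokRun rest).1) :: PySem.Chars.split₀ (tokRun rest).2 := by
  unfold PySem.Chars.split₀
  conv_lhs => rw [PySem.Chars.split₀.go]
  rw [if_neg hc]
  have := split₀_go_mid rest [c] (by simp)
  simpa [PySem.Chars.split₀] using this

lemma tokRun_eq_pvRun (s : List Char)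
    (h : ∀ c ∈ s, PySem.Chars.isspace c = pvIsWS c) : tokRun s = pvRun s := by
  induction s with
  | nil => rfl
  | cons c rest ih =>
    have hc := h c (List.mem_cons_self ..)
    have ih' := ih (fun x hx => h x (List.mem_cons_of_mem _ hx))
    simp only [tokRun, pvRun, hc, ih']

lemma tokRun_snd_suffix (s : List Char) : (tokRun s).2 <:+ s := by
  induction s with
  | nil => simp [tokRun]
  | cons c rest ih =>
    simp only [tokRun]
    split
    · exact List.suffix_rfl
    · exact ih.trans (List.suffix_cons c rest)

lemma pvSkipWS_suffix (s : List Char) : pvSkipWS s <:+ s := by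
  induction s with
  | nil => simp [pvSkipWS]
  | cons c rest ih =>
    simp only [pvSkipWS]
    split
    · exact ih.trans (List.suffix_cons c rest)
    · exact List.suffix_rfl

-- ---- B-side: the char scanner returns the head of the candidate list ----
lemma pvSkipWS_head_not_ws (s : List Char) :
    ∀ {d : Char} {ds : List Char}, pvSkipWS s = d :: ds → pvIsWS d = false := by
  induction s with
  | nil => intro d ds h; simp [pvSkipWS] at h
  | cons c rest ih =>
    intro d ds h
    simp only [pvSkipWS] at h
    by_cases hw : pvIsWS c = true
    · rw [if_pos hw] at h; exact ih h
    · rw [if_neg hw] at h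
      obtain ⟨rfl, -⟩ := List.cons.inj h
      exact Bool.not_eq_true _ |>.mp hw

lemma split₀_skipws (s : List Char)
    (h : ∀ c ∈ s, PySem.Chars.isspace c = pvIsWS c) :
    PySem.Chars.split₀ (pvSkipWS s) = PySem.Chars.split₀ s := by
  induction s with
  | nil => rfl
  | cons c rest ih =>
    have hc := h c (List.mem_cons_self ..)
    have ih' := ih (fun x hx => h x (List.mem_cons_of_mem _ hx))
    simp only [pvSkipWS]
    by_cases hw : pvIsWS c = true
    · rw [if_pos hw, ih', split₀_ws_cons (by rw [hc]; exact hw)]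
    · rw [if_neg hw]

lemma viaPairs_cons_ne {t : List Char} (h : ¬ t = "via".toList) (L : List (List Char)) :
    viaPairs (t :: L) = viaPairs L := by
  have h' : ¬ t = ['v', 'i', 'a'] := by simpa using h
  cases L <;> simp [viaPairs, h']

lemma viaPairs_cons_via (u : List Char) (L : List (List Char)) :
    viaPairs ("via".toList :: (u :: L)) = u :: viaPairs (u :: L) := by
  simp [viaPairs]

lemma scanLine_eq (s : List Char)
    (h : ∀ c ∈ s, PySem.Chars.isspace c = pvIsWS c) :
    pvScanLine s = (viaPairs (PySem.Chars.split₀ s)).head? := by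
  suffices H : ∀ (n : Nat) (s : List Char), s.length ≤ n →
      (∀ c ∈ s, PySem.Chars.isspace c = pvIsWS c) →
      pvScanLine s = (viaPairs (PySem.Chars.split₀ s)).head? from
    H s.length s le_rfl h
  clear h s
  intro n
  induction n with
  | zero =>
    intro s hlen _
    rw [List.length_eq_zero_iff.mp (Nat.le_zero.mp hlen)]
    simp [pvScanLine, PySem.Chars.split₀, PySem.Chars.split₀.go, viaPairs]
  | succ n ih =>
    intro s hlen hws
    cases s with
    | nil => simp [pvScanLine, PySem.Chars.split₀, PySem.Chars.split₀.go, viaPairs]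
    | cons c rest =>
      have hlen' : rest.length ≤ n := by simpa using hlen
      have hc := hws c (List.mem_cons_self ..)
      have hrest : ∀ x ∈ rest, PySem.Chars.isspace x = pvIsWS x :=
        fun x hx => hws x (List.mem_cons_of_mem _ hx)
      have hmemrun : ∀ x ∈ (pvRun rest).2, PySem.Chars.isspace x = pvIsWS x := by
        intro x hx
        refine hrest x ?_
        have := (tokRun_snd_suffix rest).sublist.subset
        rw [tokRun_eq_pvRun rest hrest] at this
        exact this hx
      have hlenrun : (pvRun rest).2.length ≤ n :=
        le_trans (pvRun_snd_length rest) hlen'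
      rw [pvScanLine]
      by_cases hw : pvIsWS c = true
      · rw [if_pos hw, split₀_ws_cons (by rw [hc]; exact hw)]
        exact ih rest hlen' hrest
      · rw [if_neg hw, split₀_cons_nonws (by rw [hc]; exact hw), tokRun_eq_pvRun rest hrest]
        by_cases htok : c :: (pvRun rest).1 = "via".toList
        · rw [if_pos htok, htok]
          cases hskip : pvSkipWS (pvRun rest).2 with
          | nil =>
            have h2 : PySem.Chars.split₀ (pvRun rest).2 = [] := by
              rw [← split₀_skipws _ hmemrun, hskip]; rfl
            rw [h2, ih _ hlenrun hmemrun, h2]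
            simp [viaPairs]
          | cons d ds =>
            have hmemskip : ∀ x ∈ d :: ds, PySem.Chars.isspace x = pvIsWS x := by
              intro x hx
              refine hmemrun x ?_
              have := (pvSkipWS_suffix (pvRun rest).2).sublist.subset
              rw [hskip] at this
              exact this hx
            have hd : ¬ pvIsWS d = true := by
              rw [Bool.not_eq_true]
              exact pvSkipWS_head_not_ws _ hskip
            have h2 : PySem.Chars.split₀ (pvRun rest).2 =
                (d :: (tokRun ds).1) :: PySem.Chars.split₀ (tokRun ds).2 := by
              rw [← split₀_skipws _ hmemrun, hskip,
                split₀_cons_nonws (by rw [hmemskip d (List.mem_cons_self ..)]; exact hd) ds]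
            have hds : ∀ x ∈ ds, PySem.Chars.isspace x = pvIsWS x :=
              fun x hx => hmemskip x (List.mem_cons_of_mem _ hx)
            rw [h2, viaPairs_cons_via, tokRun_eq_pvRun ds hds]
            rfl
        · rw [if_neg htok, viaPairs_cons_ne htok, ih _ hlenrun hmemrun]

-- ---- lines of splitlines contain no break chars, so on Dom isspace = pvIsWS ----
def isBrk (c : Char) : Bool :=
  have n := c.toNat
  decide (n = 10) || decide (n = 13) || decide (n = 11) || decide (n = 12) || decide (n = 28) ||
    decide (n = 29) || decide (n = 30) || decide (n = 133) || decide (n = 8232) || decide (n = 8233)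

lemma splitlines_go_chars :
    ∀ (s cur : List Char) (acc : List (List Char)),
      (∀ c ∈ s, pvDomChar c = true) →
      (∀ c ∈ cur, pvDomChar c = true ∧ isBrk c = false) →
      (∀ l ∈ acc, ∀ c ∈ l, pvDomChar c = true ∧ isBrk c = false) →
      ∀ l ∈ PySem.Chars.splitlines.go isBrk s cur acc, ∀ c ∈ l, pvDomChar c = true ∧ isBrk c = false := by
  intro s cur acc
  induction s, cur, acc using PySem.Chars.splitlines.go.induct (isB := isBrk) with
  | case1 cur acc hce =>
    intro _ hcur hacc l hl
    rw [PySem.Chars.splitlines.go.eq_def] at hl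
    simp only [hce, if_true] at hl
    exact hacc l (by simpa using hl)
  | case2 cur acc hce =>
    intro _ hcur hacc l hl
    rw [PySem.Chars.splitlines.go.eq_def] at hl
    simp only [hce] at hl
    rcases List.mem_cons.mp (List.mem_reverse.mp hl) with hl | hl
    · intro c hc; exact hcur c (by rw [hl] at hc; simpa using hc)
    · exact hacc l hl
  | case3 rest cur acc ih =>
    intro hs hcur hacc l hl
    rw [PySem.Chars.splitlines.go.eq_def] at hl
    refine ih (fun c hc => hs c (by simp [hc])) (by simp) ?_ l hl
    intro l' hl'
    rcases List.mem_cons.mp hl' with hl' | hl'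
    · intro c hc; exact hcur c (by rw [hl'] at hc; simpa using hc)
    · exact hacc l' hl'
  | case4 c rest cur acc hne hB ih =>
    intro hs hcur hacc l hl
    rw [PySem.Chars.splitlines.go.eq_def] at hl
    split at hl
    · rename_i heq; exact absurd heq (by simp)
    · rename_i heq; exact absurd heq (by intro h; obtain ⟨h1, h2⟩ := List.cons.inj h; exact hne _ h1 h2)
    · rename_i heq
      obtain ⟨h1, h2⟩ := List.cons.inj heq
      subst h1 h2
      rw [if_pos hB] at hl
      refine ih (fun x hx => hs x (by simp [hx])) (by simp) ?_ l hl
      intro l' hl'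
      rcases List.mem_cons.mp hl' with hl' | hl'
      · intro x hx; exact hcur x (by rw [hl'] at hx; simpa using hx)
      · exact hacc l' hl'
  | case5 c rest cur acc hne hB ih =>
    intro hs hcur hacc l hl
    rw [PySem.Chars.splitlines.go.eq_def] at hl
    split at hl
    · rename_i heq; exact absurd heq (by simp)
    · rename_i heq; exact absurd heq (by intro h; obtain ⟨h1, h2⟩ := List.cons.inj h; exact hne _ h1 h2)
    · rename_i heq
      obtain ⟨h1, h2⟩ := List.cons.inj heq
      subst h1 h2
      rw [if_neg hB] at hl
      refine ih (fun x hx => hs x (by simp [hx])) ?_ hacc l hl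
      intro x hx
      rcases List.mem_cons.mp hx with hx | hx
      · subst hx
        exact ⟨hs x (List.mem_cons_self ..), Bool.not_eq_true _ |>.mp hB⟩
      · exact hcur x hx

lemma splitlines_chars (s : List Char) (hs : ∀ c ∈ s, pvDomChar c = true) :
    ∀ l ∈ PySem.Chars.splitlines s, ∀ c ∈ l, pvDomChar c = true ∧ isBrk c = false := by
  intro l hl
  have h0 : PySem.Chars.splitlines s = PySem.Chars.splitlines.go isBrk s [] [] := rfl
  rw [h0] at hl
  exact splitlines_go_chars s [] [] hs (by simp) (by simp) l hl

lemma ws_of_dom {c : Char} (h1 : pvDomChar c = true) (h2 : isBrk c = false) :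
    PySem.Chars.isspace c = pvIsWS c := by
  have h1' : ((32 ≤ c.toNat ∧ c.toNat ≤ 126 ∨ c.toNat = 9) ∨ c.toNat = 10) ∨ c.toNat = 13 := by
    simpa [pvDomChar, Bool.or_eq_true, Bool.and_eq_true] using h1
  have h2' : ((((((((¬c.toNat = 10 ∧ ¬c.toNat = 13) ∧ ¬c.toNat = 11) ∧ ¬c.toNat = 12) ∧ ¬c.toNat = 28) ∧
      ¬c.toNat = 29) ∧ ¬c.toNat = 30) ∧ ¬c.toNat = 133) ∧ ¬c.toNat = 8232) ∧ ¬c.toNat = 8233 := by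
    simpa [isBrk, Bool.or_eq_false_iff, decide_eq_false_iff_not] using h2
  rw [Bool.eq_iff_iff]
  unfold PySem.Chars.isspace pvIsWS
  simp only [Bool.or_eq_true, Bool.and_eq_true, decide_eq_true_eq]
  omega

-- ===== VERDICT (by name: the statement is the Claim_ definition above) =====
theorem parse_next_hop_spec : Claim_equal_parse_next_hop := by
  intro output hdom
  unfold Spec_parse_next_hop parse_next_hop parse_next_hop_alt
  have hlines := splitlines_chars output.toList
    (by intro c hc; exact List.all_eq_true.mp hdom c hc)
  rw [linesA_eq]
  generalize hL : PySem.Chars.splitlines output.toList = L at hlines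
  clear hL hdom
  induction L with
  | nil => rfl
  | cons line rest ih =>
    have hline : ∀ c ∈ line, PySem.Chars.isspace c = pvIsWS c := by
      intro c hc
      obtain ⟨h1, h2⟩ := hlines line (List.mem_cons_self ..) c hc
      exact ws_of_dom h1 h2
    have hrest := ih (fun l hl => hlines l (List.mem_cons_of_mem _ hl))
    simp only [pvScanLines, scanLine_eq line hline, List.flatMap_cons]
    cases hvp : viaPairs (PySem.Chars.split₀ line) with
    | nil => simpa using hrest
    | cons hfst htl => simp
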